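-- pv_equiv track=rewrite | github.com/cuevasrja/Proyecto-CI5652 | src/lib/local_search.py | eval_sum_of_squared_color_sizes
-- ===== SOURCE A (Python) =====
-- def eval_sum_of_squared_color_sizes(coloring: dict[int, str]):
--     """
--     Evalúa una coloración de un grafo sumando el cuadrado de la
--     cantidad de nodos que tienen cada color.
--
--     Si se maximiza esta función, implica que se minimiza la cantidad de colores.
--     """
--     # Obtener los colores utilizados en la coloración (a partir de coloring)
--     colors = {color for color in coloring.values()}
--
--     # Inicializar la suma de cuadrados de tamaños de colores
--     sum_of_squared_color_sizes = 0
--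
--     # Iterar sobre los colores
--     for color in colors:
--         # Hallar los nodos que tienen el color actual
--         nodes = [node for node, c in coloring.items() if c == color]
--
--         # Calcular el cuadrado de la cantidad de nodos
--         squared_size = len(nodes) ** 2
--
--         # Sumar el cuadrado al total
--         sum_of_squared_color_sizes += squared_size
--
--     return sum_of_squared_color_sizes
-- ===== SOURCE B (Python) =====
-- def eval_sum_of_squared_color_sizes(coloring: dict[int, str]):
--     """Sum of squared color-class sizes: sort the color values once, then a
--     single linear run-length scan over the sorted sequence, squaring each
--     run length."""
--     values = sorted(coloring.values())
--     total = 0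
--     run = 0
--     for i, c in enumerate(values):
--         run += 1
--         if i + 1 == len(values) or values[i + 1] != c:
--             total += run * run
--             run = 0
--     return total
-- ===== Notes on version B (the rewrite author's own statement) =====
-- stated objective: faster
-- what changed: Replaces A's per-distinct-color rescan of the whole dict (build the color set, then for each color filter all items and square the match count) with one sort of the values followed by a single run-length scan that squares each run of equal colors.
import Mathlib
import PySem

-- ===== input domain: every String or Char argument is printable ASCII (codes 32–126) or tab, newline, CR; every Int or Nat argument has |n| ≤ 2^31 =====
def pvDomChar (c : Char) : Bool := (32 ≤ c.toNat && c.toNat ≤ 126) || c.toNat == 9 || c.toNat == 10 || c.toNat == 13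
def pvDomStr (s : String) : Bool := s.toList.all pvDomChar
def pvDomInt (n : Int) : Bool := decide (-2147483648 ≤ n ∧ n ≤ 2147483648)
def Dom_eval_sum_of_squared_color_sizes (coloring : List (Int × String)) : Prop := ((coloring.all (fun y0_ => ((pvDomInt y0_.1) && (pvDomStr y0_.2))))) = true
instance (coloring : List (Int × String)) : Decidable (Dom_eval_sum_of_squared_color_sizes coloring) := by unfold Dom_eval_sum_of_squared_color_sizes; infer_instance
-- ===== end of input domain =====

-- B replaces A's per-distinct-color rescan of the whole dict by sorting the values once
-- and making a single run-length scan over the sorted sequence (objective: faster; measured).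

-- ===== PORT A =====
-- colors = {color for color in coloring.values()}; for color in colors:
--   nodes = [node for node, c in coloring.items() if c == color]; sum += len(nodes) ** 2
-- (the loop over the set only SUMS, so the result does not depend on set iteration order)
def eval_sum_of_squared_color_sizes (coloring : List (Int × String)) : Int :=
  let colors : PySem.Set String := PySem.Set.ofList (coloring.map (fun kv => kv.2))
  colors.foldl (fun acc color =>
    let nodes := (coloring.filter (fun kv => kv.2 == color)).map (fun kv => kv.1)
    let squared_size := (nodes.length : Int) ^ 2
    acc + squared_size) 0

-- ===== PORT B =====
-- the 'for i, c in enumerate(values)' loop of Source B: run += 1, and when the next element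
-- differs (or the list ends) add run*run to total and reset run
def pvScan_eval_sum (values : List String) (run : Int) (total : Int) : Int :=
  match values with
  | [] => total
  | [_] => total + (run + 1) * (run + 1)
  | c :: b :: t =>
      if b ≠ c then pvScan_eval_sum (b :: t) 0 (total + (run + 1) * (run + 1))
      else pvScan_eval_sum (b :: t) (run + 1) total

def eval_sum_of_squared_color_sizes_alt (coloring : List (Int × String)) : Int :=
  let values := PySem.List.sorted (coloring.map (fun kv => kv.2)) (fun x => x) false
  pvScan_eval_sum values 0 0

-- ===== PRECONDITION & SPEC =====
def Spec_eval_sum_of_squared_color_sizes (coloring : List (Int × String)) (out : Int) : Prop := out = eval_sum_of_squared_color_sizes_alt coloring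
instance (coloring : List (Int × String)) (out : Int) : Decidable (Spec_eval_sum_of_squared_color_sizes coloring out) := by unfold Spec_eval_sum_of_squared_color_sizes; infer_instance

-- ===== CLAIM (what is proved, stated in full; the proofs are below) =====
def Claim_equal_eval_sum_of_squared_color_sizes : Prop := ∀ (coloring : List (Int × String)), Dom_eval_sum_of_squared_color_sizes coloring → Spec_eval_sum_of_squared_color_sizes coloring (eval_sum_of_squared_color_sizes coloring)

-- ===== LEMMAS AND PROOFS =====

-- Σ_{c ∈ S} (vs.count c)², the common value both programs compute (S a set of colors)
def pvSum_eval (S : List String) (vs : List String) : Int :=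
  (S.map (fun c => ((vs.count c : Int)) * (vs.count c : Int))).sum

theorem pvSum_eval_cons_set (c : String) (S vs : List String) :
    pvSum_eval (c :: S) vs
      = (vs.count c : Int) * (vs.count c : Int) + pvSum_eval S vs := by
  simp [pvSum_eval]

theorem pvSum_eval_perm (S₁ S₂ vs : List String) (h : S₁.Perm S₂) :
    pvSum_eval S₁ vs = pvSum_eval S₂ vs :=
  List.Perm.sum_eq (h.map _)

theorem pvSum_eval_count_congr (S vs₁ vs₂ : List String)
    (h : ∀ c ∈ S, vs₁.count c = vs₂.count c) : pvSum_eval S vs₁ = pvSum_eval S vs₂ := by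
  unfold pvSum_eval
  congr 1
  apply List.map_congr_left
  intro c hc
  rw [h c hc]

-- peeling one color class off the front of the multiset of values
theorem pvSum_eval_cons (b : String) (t : List String) :
    pvSum_eval (PySem.Set.ofList (b :: t)) (b :: t)
      = (1 + (t.count b : Int)) * (1 + (t.count b : Int))
        + pvSum_eval (PySem.Set.ofList (t.filter (fun x => ¬(x == b))))
            (t.filter (fun x => ¬(x == b))) := by
  have hcount : ∀ c ∈ PySem.Set.discard (PySem.Set.ofList t) b,
      (b :: t).count c = (t.filter (fun x => ¬(x == b))).count c := by
    intro c hc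
    rw [PySem.Set.mem_discard] at hc
    have hcb : c ≠ b := hc.2
    simp [List.count_filter, hcb, Ne.symm hcb]
  have hperm : (PySem.Set.discard (PySem.Set.ofList t) b).Perm
      (PySem.Set.ofList (t.filter (fun x => ¬(x == b)))) :=
    (List.perm_ext_iff_of_nodup
      (PySem.Set.nodup_discard _ _ (PySem.Set.nodup_ofList _)) (PySem.Set.nodup_ofList _)).mpr
      (fun c => by simp [PySem.Set.mem_discard, PySem.Set.mem_ofList, List.mem_filter])
  rw [PySem.Set.ofList_cons, pvSum_eval_cons_set,
      pvSum_eval_count_congr _ _ _ hcount, pvSum_eval_perm _ _ _ hperm,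
      List.count_cons_self]
  push_cast
  ring_nf

-- the running total is a plain accumulator
theorem pvScan_total_add : ∀ (l : List String) (run t₁ t₂ : Int),
    pvScan_eval_sum l run (t₁ + t₂) = t₁ + pvScan_eval_sum l run t₂
  | [], _, _, _ => by simp [pvScan_eval_sum]
  | [_], _, _, _ => by simp [pvScan_eval_sum]; ring
  | c :: b :: t, run, t₁, t₂ => by
    by_cases h : b = c
    · simp only [pvScan_eval_sum, h, ne_eq, not_true_eq_false, if_false]
      exact pvScan_total_add (c :: t) (run + 1) t₁ t₂
    · simp only [pvScan_eval_sum, ne_eq, h, not_false_iff, if_true]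
      rw [add_assoc, pvScan_total_add (b :: t) 0 t₁ ((t₂ + (run + 1) * (run + 1)))]

-- consuming the whole run of the minimal color a at the front of a sorted tail
theorem pvScan_consume (t : List String) (a : String) (run total : Int)
    (hmin : ∀ x ∈ t, a ≤ x) (hp : t.Pairwise (· ≤ ·)) :
    pvScan_eval_sum (a :: t) run total
      = total + (run + 1 + (t.count a : Int)) * (run + 1 + (t.count a : Int))
        + pvScan_eval_sum (t.filter (fun x => ¬(x == a))) 0 0 := by
  induction t generalizing run total with
  | nil => simp [pvScan_eval_sum]
  | cons b t' ih =>
    by_cases hba : b = a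
    · subst hba
      have h1 : pvScan_eval_sum (b :: b :: t') run total
          = pvScan_eval_sum (b :: t') (run + 1) total := by
        simp [pvScan_eval_sum]
      rw [h1, ih (run + 1) total (fun x hx => hmin x (List.mem_cons_of_mem _ hx))
        (List.Pairwise.of_cons hp)]
      have hc : ((b :: t').count b : Int) = (t'.count b : Int) + 1 := by
        rw [List.count_cons_self]; push_cast; ring
      have hf : (b :: t').filter (fun x => ¬(x == b)) = t'.filter (fun x => ¬(x == b)) := by
        simp
      rw [hc, hf]
      ring_nf
    · have hab : a ≤ b := hmin b List.mem_cons_self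
      have hanotin : a ∉ b :: t' := by
        intro hmem
        rcases List.mem_cons.mp hmem with h | h
        · exact hba h.symm
        · have hba' : b ≤ a := (List.pairwise_cons.mp hp).1 a h
          exact hba (le_antisymm hba' hab)
      have h1 : pvScan_eval_sum (a :: b :: t') run total
          = pvScan_eval_sum (b :: t') 0 (total + (run + 1) * (run + 1)) := by
        simp [pvScan_eval_sum, hba]
      have hc : (b :: t').count a = 0 := List.count_eq_zero.mpr hanotin
      have hf : (b :: t').filter (fun x => ¬(x == a)) = b :: t' := by
        apply List.filter_eq_self.mpr
        intro x hx
        have hxa : x ≠ a := fun h => hanotin (h ▸ hx)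
        simp [hxa]
      have h2 : total + (run + 1) * (run + 1)
          = (total + (run + 1) * (run + 1)) + 0 := by ring
      rw [h1, hc, hf, h2, pvScan_total_add]
      push_cast
      ring_nf

-- on a sorted list the scan computes Σ over the distinct colors of count²
theorem pvScan_eq_pvSum : ∀ (l : List String), l.Pairwise (· ≤ ·) →
    pvScan_eval_sum l 0 0 = pvSum_eval (PySem.Set.ofList l) l
  | [], _ => by simp [pvScan_eval_sum, pvSum_eval, PySem.Set.ofList_nil]
  | a :: t, hp => by
    have hmin : ∀ x ∈ t, a ≤ x := (List.pairwise_cons.mp hp).1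
    have hpt : t.Pairwise (· ≤ ·) := (List.pairwise_cons.mp hp).2
    have ih := pvScan_eq_pvSum (t.filter (fun x => ¬(x == a)))
      (List.Pairwise.filter _ hpt)
    rw [pvScan_consume t a 0 0 hmin hpt, ih, pvSum_eval_cons]
    ring_nf
termination_by l => l.length
decreasing_by
  simp only [List.length_cons]
  exact Nat.lt_succ_of_le (List.length_filter_le _ _)

-- A's fold over the color set is Σ over the distinct colors of count²
theorem portA_eq_pvSum (coloring : List (Int × String)) :
    eval_sum_of_squared_color_sizes coloring
      = pvSum_eval (PySem.Set.ofList (coloring.map (fun kv => kv.2)))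
          (coloring.map (fun kv => kv.2)) := by
  unfold eval_sum_of_squared_color_sizes
  rw [PySem.List.foldl_add]
  unfold pvSum_eval
  rw [zero_add]
  apply congrArg List.sum
  apply List.map_congr_left
  intro c _
  have hcount : ((coloring.filter (fun kv => kv.2 == c)).map (fun kv => kv.1)).length
      = (coloring.map (fun kv => kv.2)).count c := by
    rw [List.length_map, List.count, List.countP_map, List.countP_eq_length_filter]
    rfl
  simp only [hcount]
  ring

-- ===== VERDICT (by name: the statement is the Claim_ definition above) =====
theorem eval_sum_of_squared_color_sizes_spec : Claim_equal_eval_sum_of_squared_color_sizes := by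
  intro coloring _
  unfold Spec_eval_sum_of_squared_color_sizes
  unfold eval_sum_of_squared_color_sizes_alt
  set vs := coloring.map (fun kv => kv.2) with hvs
  set ss := PySem.List.sorted vs (fun x => x) false with hss
  have hperm : ss.Perm vs := PySem.List.sorted_perm vs (fun x => x) false
  have hpair : ss.Pairwise (· ≤ ·) := PySem.List.sorted_pairwise vs (fun x => x)
  rw [portA_eq_pvSum, pvScan_eq_pvSum ss hpair]
  have hcount : ∀ c ∈ PySem.Set.ofList ss, ss.count c = vs.count c :=
    fun c _ => hperm.count_eq c
  rw [pvSum_eval_count_congr _ _ _ hcount]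
  apply pvSum_eval_perm
  exact (List.perm_ext_iff_of_nodup (PySem.Set.nodup_ofList _) (PySem.Set.nodup_ofList _)).mpr
    (fun c => by
      rw [PySem.Set.mem_ofList, PySem.Set.mem_ofList]
      exact hperm.mem_iff.symm)
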